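-- pv_equiv track=rewrite | github.com/devgreeny/wheredhego_v1 | app/starting11/routes.py | calculate_formation
-- ===== SOURCE A (Python) =====
-- def calculate_formation(players):
--     """Calculate formation from player positions (e.g., '4-4-2')."""
--     if not players or len(players) != 11:
--         return "?"
--
--     # Get y positions (excluding goalkeeper - lowest y)
--     y_positions = sorted([p['position']['y'] for p in players])
--
--     # Goalkeeper is the one with lowest y (closest to goal at bottom)
--     outfield_y = y_positions[1:]  # Remove goalkeeper
--
--     # Group players into lines based on y-position clusters
--     # Use a threshold to determine if players are on the same "line"
--     threshold = 8
--     lines = []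
--     current_line = [outfield_y[0]]
--
--     for y in outfield_y[1:]:
--         if y - current_line[-1] < threshold:
--             current_line.append(y)
--         else:
--             lines.append(len(current_line))
--             current_line = [y]
--     lines.append(len(current_line))
--
--     # Format as formation string (e.g., "4-4-2")
--     return "-".join(str(n) for n in lines)
-- ===== SOURCE B (Python) =====
-- def calculate_formation(players):
--     """Calculate formation from player positions (e.g., '4-4-2')."""
--     if not players or len(players) != 11:
--         return "?"
--     outfield = sorted(p['position']['y'] for p in players)[1:]
--
--     def chop(xs):
--         # measure the leading line (maximal prefix chained by gaps < 8), recurse on the rest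
--         if not xs:
--             return []
--         k = 1
--         while k < len(xs) and xs[k] - xs[k - 1] < 8:
--             k += 1
--         return [str(k)] + chop(xs[k:])
--
--     return "-".join(chop(outfield))
-- ===== Notes on version B (the rewrite author's own statement) =====
-- stated objective: alternative
-- what changed: B replaces A's single accumulate-and-flush loop with a recursive divide: an inner scan measures the length of the leading gap-chained prefix, that size is emitted, and the function recurses on the remaining suffix, so no running current_line/lines state is maintained.
import Mathlib
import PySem

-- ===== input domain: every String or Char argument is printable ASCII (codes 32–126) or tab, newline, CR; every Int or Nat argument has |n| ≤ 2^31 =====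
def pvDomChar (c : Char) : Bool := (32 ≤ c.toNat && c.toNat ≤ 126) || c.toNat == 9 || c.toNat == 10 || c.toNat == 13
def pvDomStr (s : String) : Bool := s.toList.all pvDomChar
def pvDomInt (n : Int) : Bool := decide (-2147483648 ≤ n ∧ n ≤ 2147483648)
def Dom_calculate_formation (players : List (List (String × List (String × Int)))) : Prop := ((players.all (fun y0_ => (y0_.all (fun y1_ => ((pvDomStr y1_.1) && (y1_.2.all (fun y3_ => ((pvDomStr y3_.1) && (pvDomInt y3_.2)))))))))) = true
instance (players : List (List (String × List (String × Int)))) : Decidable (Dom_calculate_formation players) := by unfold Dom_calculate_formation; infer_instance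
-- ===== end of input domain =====

-- B replaces A's accumulate-and-flush loop with a recursive divide: measure the leading
-- gap-chained prefix, emit its size, recurse on the suffix (objective: alternative).

-- shared accessor: p['position']['y'] (both raises are excluded by Pre_; 0 is never used inside Pre_)
def pvY (p : List (String × List (String × Int))) : Int :=
  (((PySem.Dict.ofList p).get? "position").bind
    (fun d => (PySem.Dict.ofList d).get? "y")).getD 0

-- ===== PORT A =====
def calculate_formation (players : List (List (String × List (String × Int)))) : String :=
  if players = [] ∨ players.length ≠ 11 then "?" else
    let y_positions := PySem.List.sorted (players.map pvY) (fun y => y) false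
    let outfield_y := PySem.List.slice y_positions (some 1) none
    let st := (PySem.List.slice outfield_y (some 1) none).foldl
      (fun (st : List Int × List Int) y =>
        if y - (PySem.List.pyGet? st.2 (-1)).getD 0 < 8 then (st.1, st.2 ++ [y])
        else (st.1 ++ [(st.2.length : Int)], [y]))
      ([], [(PySem.List.pyGet? outfield_y 0).getD 0])
    PySem.Str.join "-" ((st.1 ++ [(st.2.length : Int)]).map PySem.Int.toStr)

-- ===== PORT B =====
-- Source B's inner 'while k < len(xs) and xs[k] - xs[k-1] < 8' walk, structurally: the number of
-- elements of the list that chain (gap < 8) onto the previous element p.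
def pvChain (p : Int) : List Int → Nat
  | [] => 0
  | y :: t => if y - p < 8 then 1 + pvChain y t else 0

-- Source B's chop: emit the leading line's size, recurse on xs[k:] (slice with 0 ≤ k = List.drop, exact)
def pvChop : List Int → List String
  | [] => []
  | x :: t =>
    PySem.Int.toStr ((1 + pvChain x t : Nat) : Int) :: pvChop ((x :: t).drop (1 + pvChain x t))
  termination_by l => l.length
  decreasing_by simp [List.length_drop]

def calculate_formation_alt (players : List (List (String × List (String × Int)))) : String :=
  if players = [] ∨ players.length ≠ 11 then "?" else
    let outfield := PySem.List.slice (PySem.List.sorted (players.map pvY) (fun y => y) false) (some 1) none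
    PySem.Str.join "-" (pvChop outfield)

-- ===== PRECONDITION & SPEC =====
-- Pre_ excludes exactly the inputs where A raises KeyError: 11 players and some player lacking
-- 'position' or its 'y' entry. It excludes nothing A returns on.
def Pre_calculate_formation (players : List (List (String × List (String × Int)))) : Prop :=
  players.length = 11 →
    ∀ p ∈ players, (((PySem.Dict.ofList p).get? "position").bind
      (fun d => (PySem.Dict.ofList d).get? "y")).isSome
instance (players : List (List (String × List (String × Int)))) : Decidable (Pre_calculate_formation players) := by unfold Pre_calculate_formation; infer_instance

def pvWitness_calculate_formation : (List (List (String × List (String × Int)))) :=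
  [[("position", [("y", 2)])], [("position", [("y", 30)])], [("position", [("y", 30)])],
   [("position", [("y", 31)])], [("position", [("y", 32)])], [("position", [("y", 50)])],
   [("position", [("y", 51)])], [("position", [("y", 52)])], [("position", [("y", 53)])],
   [("position", [("y", 70)])], [("position", [("y", 71)])]]

def Spec_calculate_formation (players : List (List (String × List (String × Int)))) (out : String) : Prop := out = calculate_formation_alt players
instance (players : List (List (String × List (String × Int)))) (out : String) : Decidable (Spec_calculate_formation players out) := by unfold Spec_calculate_formation; infer_instance

-- ===== CLAIM (what is proved, stated in full; the proofs are below) =====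
def Claim_equal_calculate_formation : Prop := ∀ (players : List (List (String × List (String × Int)))), Dom_calculate_formation players → Pre_calculate_formation players → Spec_calculate_formation players (calculate_formation players)

-- ===== LEMMAS AND PROOFS =====

-- group sizes of x :: t under the gap-8 rule (reference shape both ports are reduced to)
def pvSz : Int → List Int → List Int
  | _, [] => [1]
  | x, y :: t =>
    if y - x < 8 then
      match pvSz y t with
      | s :: r => (s + 1) :: r
      | [] => [1]
    else 1 :: pvSz y t

lemma pvSz_ne_nil (x : Int) (t : List Int) : pvSz x t ≠ [] := by
  cases t with
  | nil => simp [pvSz]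
  | cons y t =>
    simp only [pvSz]
    split_ifs
    · cases pvSz y t <;> simp
    · simp

def pvAddHead (k : Int) : List Int → List Int
  | [] => []
  | s :: r => (k + s) :: r

def pvStep (st : List Int × List Int) (y : Int) : List Int × List Int :=
  if y - (PySem.List.pyGet? st.2 (-1)).getD 0 < 8 then (st.1, st.2 ++ [y])
  else (st.1 ++ [(st.2.length : Int)], [y])

lemma pvFoldA (t : List Int) : ∀ (L c : List Int) (x : Int), c ≠ [] → c.getLast? = some x →
    (let st := t.foldl pvStep (L, c); st.1 ++ [(st.2.length : Int)])
      = L ++ pvAddHead ((c.length : Int) - 1) (pvSz x t) := by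
  induction t with
  | nil =>
    intro L c x hc hl
    simp [pvSz, pvAddHead]
  | cons y t ih =>
    intro L c x hc hl
    have hlast : (PySem.List.pyGet? c (-1)).getD 0 = x := by
      rw [PySem.List.pyGet?_neg_one, hl]; rfl
    simp only [List.foldl_cons]
    by_cases h : y - x < 8
    · have hstep : pvStep (L, c) y = (L, c ++ [y]) := by
        simp [pvStep, hlast, h]
      rw [hstep, ih L (c ++ [y]) y (by simp) (by simp)]
      have hsz : pvSz x (y :: t) =
          match pvSz y t with
          | s :: r => (s + 1) :: r
          | [] => [1] := by simp [pvSz, h]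
      obtain ⟨s, r, hsr⟩ : ∃ s r, pvSz y t = s :: r := by
        cases hszyt : pvSz y t with
        | nil => exact absurd hszyt (pvSz_ne_nil y t)
        | cons s r => exact ⟨s, r, rfl⟩
      rw [hsz, hsr]
      simp [pvAddHead]
    · have hstep : pvStep (L, c) y = (L ++ [(c.length : Int)], [y]) := by
        simp [pvStep, hlast, h]
      rw [hstep, ih (L ++ [(c.length : Int)]) [y] y (by simp) (by simp)]
      have hsz : pvSz x (y :: t) = 1 :: pvSz y t := by simp [pvSz, h]
      rw [hsz]
      obtain ⟨s, r, hsr⟩ : ∃ s r, pvSz y t = s :: r := by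
        cases hszyt : pvSz y t with
        | nil => exact absurd hszyt (pvSz_ne_nil y t)
        | cons s r => exact ⟨s, r, rfl⟩
      rw [hsr]
      simp [pvAddHead]

-- pvSz splits as: head = 1 + chain length, tail = the sizes of what remains after the chain
lemma pvSz_eq (t : List Int) : ∀ x, pvSz x t =
    (((1 + pvChain x t : Nat) : Int) ::
      (match t.drop (pvChain x t) with | [] => [] | z :: r => pvSz z r)) := by
  induction t with
  | nil => intro x; simp [pvSz, pvChain]
  | cons y t ih =>
    intro x
    by_cases h : y - x < 8
    · have hc : pvChain x (y :: t) = 1 + pvChain y t := by simp [pvChain, h]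
      obtain ⟨s, r, hsr⟩ : ∃ s r, pvSz y t = s :: r := by
        cases hszyt : pvSz y t with
        | nil => exact absurd hszyt (pvSz_ne_nil y t)
        | cons s r => exact ⟨s, r, rfl⟩
      have hsz : pvSz x (y :: t) = (s + 1) :: r := by simp [pvSz, h, hsr]
      have ihy := ih y
      rw [hsr] at ihy
      injection ihy with hs hr
      rw [hsz, hc]
      have hdrop : (y :: t).drop (1 + pvChain y t) = t.drop (pvChain y t) := by
        rw [Nat.add_comm]; exact List.drop_succ_cons
      rw [hdrop, hs, ← hr]
      congr 1
      push_cast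
      ring
    · have hc : pvChain x (y :: t) = 0 := by simp [pvChain, h]
      have hsz : pvSz x (y :: t) = 1 :: pvSz y t := by simp [pvSz, h]
      rw [hsz, hc]
      simp

lemma pvChop_nil : pvChop [] = [] := by rw [pvChop.eq_def]

lemma pvChop_cons_eq (x : Int) (t : List Int) :
    pvChop (x :: t)
      = PySem.Int.toStr ((1 + pvChain x t : Nat) : Int) :: pvChop ((x :: t).drop (1 + pvChain x t)) := by
  rw [pvChop.eq_def]

-- B's chop computes exactly pvSz, rendered
lemma pvChop_cons : ∀ (n : Nat) (t : List Int) (x : Int), t.length ≤ n →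
    pvChop (x :: t) = (pvSz x t).map PySem.Int.toStr := by
  intro n
  induction n with
  | zero =>
    intro t x ht
    have : t = [] := List.eq_nil_of_length_eq_zero (Nat.le_zero.mp ht)
    subst this
    rw [pvChop_cons_eq]
    simp [pvChop, pvSz, pvChain]
  | succ n ih =>
    intro t x ht
    rw [pvChop_cons_eq, pvSz_eq]
    have hdrop : (x :: t).drop (1 + pvChain x t) = t.drop (pvChain x t) := by
      rw [Nat.add_comm]; exact List.drop_succ_cons
    rw [hdrop]
    cases hd : t.drop (pvChain x t) with
    | nil => simp [pvChop_nil]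
    | cons z r =>
      have hlen : r.length ≤ n := by
        have := List.length_drop (l := t) (i := pvChain x t)
        rw [hd] at this
        simp at this
        omega
      rw [ih r z hlen]
      simp

-- ===== VERDICT helpers =====
lemma pvAddHead_zero (l : List Int) : pvAddHead 0 l = l := by
  cases l <;> simp [pvAddHead]

theorem calculate_formation_spec : Claim_equal_calculate_formation := by
  intro players _ _
  unfold Spec_calculate_formation calculate_formation calculate_formation_alt
  by_cases hg : players = [] ∨ players.length ≠ 11
  · simp only [if_pos hg]
  · simp only [if_neg hg]
    rw [PySem.List.slice_from_one]
    set o := (PySem.List.sorted (players.map pvY) (fun y => y) false).tail with ho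
    have hlen11 : players.length = 11 := by
      rcases not_or.mp hg with ⟨_, h⟩; omega
    have holen : o.length = 10 := by
      rw [ho, List.length_tail, PySem.List.length_sorted, List.length_map, hlen11]
    obtain ⟨x, t, hxt⟩ := List.exists_cons_of_ne_nil (by intro h; rw [h] at holen; simp at holen : o ≠ [])
    rw [hxt]
    rw [PySem.List.slice_from_one]
    simp only [List.tail_cons, PySem.List.pyGet?_zero_cons, Option.getD_some]
    have hstep : (fun (st : List Int × List Int) y =>
        if y - (PySem.List.pyGet? st.2 (-1)).getD 0 < 8 then (st.1, st.2 ++ [y])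
        else (st.1 ++ [(st.2.length : Int)], [y])) = pvStep := rfl
    rw [hstep]
    have hA := pvFoldA t [] [x] x (by simp) (by simp)
    simp only at hA
    rw [hA]
    have h0 : (([x].length : Int) - 1) = 0 := by simp
    rw [h0, pvAddHead_zero, List.nil_append]
    rw [pvChop_cons t.length t x le_rfl]
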